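-- pv_equiv track=rewrite | github.com/SajayR/C-ReLoRA | models/dinov2_relora.py | _power_of_two_blocks
-- ===== SOURCE A (Python) =====
-- from typing import Dict, Iterable, List, Optional, Tuple
--
-- def _power_of_two_blocks(dim: int) -> List[int]:
--     """Decompose ``dim`` into a sum of descending powers of two."""
--
--     if dim <= 0:
--         raise ValueError("Dimension for orthonormal basis must be positive")
--
--     blocks: List[int] = []
--     bit = 1 << (dim.bit_length() - 1)
--     remaining = dim
--     while remaining:
--         if remaining >= bit:
--             blocks.append(bit)
--             remaining -= bit
--         bit >>= 1
--     return blocks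
-- ===== SOURCE B (Python) =====
-- from typing import List
--
--
-- def _power_of_two_blocks(dim: int) -> List[int]:
--     """Decompose ``dim`` into a sum of descending powers of two."""
--
--     if dim <= 0:
--         raise ValueError("Dimension for orthonormal basis must be positive")
--
--     blocks: List[int] = []
--     remaining = dim
--     low = 1
--     while remaining:
--         if remaining % 2:
--             blocks.append(low)
--         remaining //= 2
--         low *= 2
--     return blocks[::-1]
-- ===== Notes on version B (the rewrite author's own statement) =====
-- stated objective: alternative
-- what changed: B scans bits from the least-significant end by halving (parity test + doubling accumulator, no precomputed bit_length and no greedy subtraction of the most significant power) and reverses the collected list, instead of A's MSB-down greedy scan with a shifting bit register.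
import Mathlib
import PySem

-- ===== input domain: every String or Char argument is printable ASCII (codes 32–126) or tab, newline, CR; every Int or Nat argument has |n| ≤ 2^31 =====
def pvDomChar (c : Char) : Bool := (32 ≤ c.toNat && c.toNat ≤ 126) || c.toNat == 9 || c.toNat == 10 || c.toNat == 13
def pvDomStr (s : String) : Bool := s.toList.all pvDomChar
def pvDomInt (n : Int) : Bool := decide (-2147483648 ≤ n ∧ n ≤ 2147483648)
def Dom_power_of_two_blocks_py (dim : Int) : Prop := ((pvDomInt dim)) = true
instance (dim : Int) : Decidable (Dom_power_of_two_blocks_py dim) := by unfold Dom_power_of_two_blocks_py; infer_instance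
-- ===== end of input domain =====

-- B scans bits least-significant-first (parity test + halving, doubling accumulator) and reverses,
-- instead of A's MSB-down greedy subtraction with a shifting bit register; same asymptotic cost.


-- ===== PORT A =====
-- the 'while remaining' loop of A; with bit = 0 and remaining ≠ 0 Python would loop forever,
-- which is unreachable from power_of_two_blocks_py's call (dim > 0); we return blocks there.
def loopA_pow2 (bit : Nat) (remaining : Int) (blocks : List Int) : List Int :=
  if remaining = 0 then blocks
  else if bit = 0 then blocks
  else if (bit : Int) ≤ remaining then loopA_pow2 (bit / 2) (remaining - (bit : Int)) (blocks ++ [(bit : Int)])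
  else loopA_pow2 (bit / 2) remaining blocks
termination_by bit
decreasing_by all_goals exact Nat.div_lt_self (by omega) (by omega)

def power_of_two_blocks_py (dim : Int) : List Int :=
  if dim ≤ 0 then []  -- Python raises ValueError here; excluded by Pre_
  else loopA_pow2 (1 <<< (PySem.Int.bitLength dim - 1)) dim []

-- ===== PORT B =====
-- the 'while remaining' loop of B; the fuel argument only makes the recursion total
-- (dim.toNat steps always suffice for dim > 0, the only reachable case).
def loopB_pow2 : Nat → Int → Int → List Int → List Int
  | 0, _, _, blocks => blocks
  | fuel + 1, remaining, low, blocks =>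
    if remaining = 0 then blocks
    else loopB_pow2 fuel (PySem.Int.floordiv remaining 2) (low * 2)
      (if PySem.Int.mod remaining 2 ≠ 0 then blocks ++ [low] else blocks)

def power_of_two_blocks_py_alt (dim : Int) : List Int :=
  if dim ≤ 0 then []  -- Python raises ValueError here; excluded by Pre_
  else (loopB_pow2 dim.toNat dim 1 []).reverse

-- ===== PRECONDITION & SPEC =====
-- A raises ValueError exactly when dim ≤ 0; Pre_ admits every input A returns on.
def Pre_power_of_two_blocks_py (dim : Int) : Prop := 0 < dim
instance (dim : Int) : Decidable (Pre_power_of_two_blocks_py dim) := by unfold Pre_power_of_two_blocks_py; infer_instance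
def pvWitness_power_of_two_blocks_py : Int := (11)

def Spec_power_of_two_blocks_py (dim : Int) (out : List Int) : Prop := out = power_of_two_blocks_py_alt dim
instance (dim : Int) (out : List Int) : Decidable (Spec_power_of_two_blocks_py dim out) := by unfold Spec_power_of_two_blocks_py; infer_instance

-- ===== CLAIM (what is proved, stated in full; the proofs are below) =====
def Claim_equal_power_of_two_blocks_py : Prop := ∀ (dim : Int), Dom_power_of_two_blocks_py dim → Pre_power_of_two_blocks_py dim → Spec_power_of_two_blocks_py dim (power_of_two_blocks_py dim)

-- ===== LEMMAS AND PROOFS =====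
def descBits (n : Nat) : List Int :=
  if _h : n = 0 then []
  else (descBits (n / 2)).map (· * 2) ++ (if n % 2 = 1 then [(1 : Int)] else [])
termination_by n
decreasing_by exact Nat.div_lt_self (by omega) (by omega)

def ascBits (n : Nat) : List Int :=
  if _h : n = 0 then []
  else (if n % 2 = 1 then [(1 : Int)] else []) ++ (ascBits (n / 2)).map (· * 2)
termination_by n
decreasing_by exact Nat.div_lt_self (by omega) (by omega)

lemma descBits_zero : descBits 0 = [] := by rw [descBits]; norm_num
lemma descBits_one : descBits 1 = [1] := by rw [descBits]; norm_num [descBits_zero]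
lemma descBits_two : descBits 2 = [2] := by rw [descBits]; norm_num [descBits_one]
lemma descBits_three : descBits 3 = [2, 1] := by rw [descBits]; norm_num [descBits_one]

lemma ascBits_reverse (n : Nat) : (ascBits n).reverse = descBits n := by
  induction n using Nat.strong_induction_on with
  | _ n ih =>
    rw [ascBits, descBits]
    by_cases h : n = 0
    · simp [h]
    · simp only [h, dif_neg, not_false_iff, List.reverse_append, ← List.map_reverse]
      rw [ih (n / 2) (Nat.div_lt_self (by omega) (by omega))]
      by_cases hp : n % 2 = 1 <;> simp [hp]

lemma descBits_msb : ∀ (k n : Nat), 2 ^ (k + 1) ≤ n → n < 2 ^ (k + 2) →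
    descBits n = ((2 ^ (k + 1) : Nat) : Int) :: descBits (n - 2 ^ (k + 1)) := by
  intro k
  induction k with
  | zero =>
    intro n h1 h2
    norm_num at h1 h2 ⊢
    interval_cases n
    · simp [descBits_two, descBits_zero]
    · simp [descBits_three, descBits_one]
  | succ k ih =>
    intro n h1 h2
    have e1 : (2 : Nat) ^ (k + 1 + 1) = 2 * 2 ^ (k + 1) := by ring
    have e2 : (2 : Nat) ^ (k + 1 + 2) = 4 * 2 ^ (k + 1) := by ring
    have e3 : (2 : Nat) ^ (k + 2) = 2 * 2 ^ (k + 1) := by ring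
    have hn2 : 2 ^ (k + 1) ≤ n / 2 := by omega
    have hn2' : n / 2 < 2 ^ (k + 2) := by omega
    have hdiv : (n - 2 ^ (k + 1 + 1)) / 2 = n / 2 - 2 ^ (k + 1) := by omega
    have hmod : (n - 2 ^ (k + 1 + 1)) % 2 = n % 2 := by omega
    rw [descBits, dif_neg (by omega), ih (n / 2) hn2 hn2']
    by_cases hz : n - 2 ^ (k + 1 + 1) = 0
    · have hhalf : n / 2 - 2 ^ (k + 1) = 0 := by omega
      have hm : n % 2 = 0 := by omega
      rw [hz, hhalf]
      simp [hm, descBits_zero]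
      ring
    · conv_rhs => rw [descBits]
      rw [dif_neg hz, hdiv, hmod]
      simp only [List.map_cons, List.cons_append]
      congr 1

lemma loopB_eq (fuel : Nat) : ∀ (n : Nat) (low : Int) (blocks : List Int), n ≤ fuel →
    loopB_pow2 fuel (n : Int) low blocks = blocks ++ (ascBits n).map (· * low) := by
  induction fuel with
  | zero =>
    intro n low blocks hn
    have h0 : n = 0 := by omega
    subst h0
    rw [ascBits]; simp [loopB_pow2]
  | succ f ih =>
    intro n low blocks hn
    by_cases h : n = 0
    · subst h; rw [ascBits]; simp [loopB_pow2]
    · have ha : ascBits n = (if n % 2 = 1 then [(1 : Int)] else []) ++ (ascBits (n / 2)).map (· * 2) := by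
        rw [ascBits, dif_neg h]
      rw [loopB_pow2, if_neg (by exact_mod_cast h)]
      have hfd : PySem.Int.floordiv (n : Int) 2 = ((n / 2 : Nat) : Int) := by
        exact_mod_cast PySem.Int.floordiv_natCast n 2
      have hmd : PySem.Int.mod (n : Int) 2 = ((n % 2 : Nat) : Int) := by
        exact_mod_cast PySem.Int.mod_natCast n 2
      rw [hfd, hmd, ih (n / 2) (low * 2) _ (by omega), ha]
      have hmap : (ascBits (n / 2)).map (· * (low * 2))
          = ((ascBits (n / 2)).map (· * 2)).map (· * low) := by
        rw [List.map_map]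
        apply List.map_congr_left
        intro a _
        simp only [Function.comp_apply]
        ring
      rw [hmap]
      by_cases hp : n % 2 = 1
      · simp [hp, List.append_assoc]
      · have h0 : n % 2 = 0 := by omega
        simp [h0]

lemma loopA_eq : ∀ (k : Nat), ∀ (n : Nat) (blocks : List Int), n < 2 ^ (k + 1) →
    loopA_pow2 (2 ^ k) (n : Int) blocks = blocks ++ descBits n := by
  intro k
  induction k with
  | zero =>
    intro n blocks hn
    norm_num at hn
    interval_cases n
    · rw [loopA_pow2, descBits_zero]; simp
    · rw [loopA_pow2]
      norm_num
      rw [loopA_pow2, descBits_one]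
      norm_num
  | succ k ih =>
    intro n blocks hn
    by_cases h : n = 0
    · subst h; rw [loopA_pow2, descBits_zero]; simp
    · rw [loopA_pow2, if_neg (by exact_mod_cast h), if_neg (by positivity)]
      have hhalf : 2 ^ (k + 1) / 2 = 2 ^ k := by
        rw [pow_succ]; omega
      have e1 : (2 : Nat) ^ (k + 1 + 1) = 2 * 2 ^ (k + 1) := by ring
      by_cases hge : 2 ^ (k + 1) ≤ n
      · rw [if_pos (by exact_mod_cast hge), hhalf]
        have hcast : (n : Int) - ((2 ^ (k + 1) : Nat) : Int) = ((n - 2 ^ (k + 1) : Nat) : Int) := by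
          push_cast [hge]; ring
        rw [hcast, ih (n - 2 ^ (k + 1)) _ (by omega)]
        rw [descBits_msb k n hge hn]
        simp [List.append_assoc]
      · rw [if_neg (by exact_mod_cast hge), hhalf]
        exact ih n blocks (by omega)

theorem final_eq (dim : Int) (hpre : 0 < dim) :
    power_of_two_blocks_py dim = power_of_two_blocks_py_alt dim := by
  unfold power_of_two_blocks_py power_of_two_blocks_py_alt
  rw [if_neg (by omega), if_neg (by omega)]
  obtain ⟨n, hn⟩ : ∃ n : Nat, dim = (n : Int) := ⟨dim.toNat, by omega⟩
  subst hn
  have hn1 : 1 ≤ n := by exact_mod_cast hpre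
  set L := PySem.Int.bitLength (n : Int) with hL
  have hlt : n < 2 ^ L := by
    have := PySem.Int.lt_two_pow_bitLength (n : Int)
    simpa using this
  have hle : 2 ^ (L - 1) ≤ n := by
    have := PySem.Int.two_pow_bitLength_le (n : Int) (by exact_mod_cast hpre.ne')
    simpa using this
  have hLpos : 1 ≤ L := by
    by_contra hc
    have : L = 0 := by omega
    rw [this] at hlt
    omega
  have hshift : 1 <<< (L - 1) = 2 ^ (L - 1) := Nat.one_shiftLeft (L - 1)
  have hA : loopA_pow2 (1 <<< (L - 1)) (n : Int) [] = descBits n := by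
    rw [hshift]
    have := loopA_eq (L - 1) n [] (by
      have : L - 1 + 1 = L := by omega
      rw [this]; exact hlt)
    simpa using this
  have hB : loopB_pow2 ((n : Int)).toNat (n : Int) 1 [] = ascBits n := by
    have ht : ((n : Int)).toNat = n := Int.toNat_natCast n
    rw [ht]
    have := loopB_eq n n 1 [] le_rfl
    simpa using this
  rw [hA, hB, ascBits_reverse]

-- ===== VERDICT (by name: the statement is the Claim_ definition above) =====
theorem power_of_two_blocks_py_spec : Claim_equal_power_of_two_blocks_py := by
  intro dim _hdom hpre
  exact final_eq dim hpre
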